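-- pv_equiv track=rewrite | github.com/simonzeiger/LearnSheetMusic | logic.py | note_number_in_scale_from_semitones
-- ===== SOURCE A (Python) =====
-- NOT_IN_SCALE = -10000
--
-- NOTE_JUMPS = [2, 2, 1, 2, 2, 2, 1]
--
-- REV_NOTE_JUMPS = NOTE_JUMPS[::-1]
--
-- def note_number_in_scale_from_semitones(semis):
--     if (semis == 0):
--         return 0
--     if (semis >= 0):
--         i = 0
--         count = 0
--         while(True):
--             for jump in NOTE_JUMPS:
--                 count += jump
--                 if (count == semis):
--                     return i+1
--                 if (count > semis):
--                     return NOT_IN_SCALE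
--                 i += 1
--     else:
--         i = 0
--         count = 0
--         while(True):
--             for jump in REV_NOTE_JUMPS:
--                 count -= jump
--                 if (count == semis):
--                     return i-1
--                 if (count < semis):
--                     return NOT_IN_SCALE
--                 i -= 1
-- ===== SOURCE B (Python) =====
-- NOT_IN_SCALE = -10000
--
-- # degree within an octave keyed by pitch class (floor-mod 12)
-- _DEGREE_BY_PC = {0: 0, 2: 1, 4: 2, 5: 3, 7: 4, 9: 5, 11: 6}
--
-- def note_number_in_scale_from_semitones(semis):
--     d = _DEGREE_BY_PC.get(semis % 12)
--     if d is None: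
--         return NOT_IN_SCALE
--     return 7 * (semis // 12) + d
-- ===== Notes on version B (the rewrite author's own statement) =====
-- stated objective: faster
-- what changed: Replaces the unbounded while-loop that accumulates scale jumps one step at a time with an O(1) closed form: a precomputed pitch-class-to-degree dict lookup on the floor-mod of semis by an octave, plus an octave multiple from floor division; Python's floor semantics let one formula cover both signs.
import Mathlib
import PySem

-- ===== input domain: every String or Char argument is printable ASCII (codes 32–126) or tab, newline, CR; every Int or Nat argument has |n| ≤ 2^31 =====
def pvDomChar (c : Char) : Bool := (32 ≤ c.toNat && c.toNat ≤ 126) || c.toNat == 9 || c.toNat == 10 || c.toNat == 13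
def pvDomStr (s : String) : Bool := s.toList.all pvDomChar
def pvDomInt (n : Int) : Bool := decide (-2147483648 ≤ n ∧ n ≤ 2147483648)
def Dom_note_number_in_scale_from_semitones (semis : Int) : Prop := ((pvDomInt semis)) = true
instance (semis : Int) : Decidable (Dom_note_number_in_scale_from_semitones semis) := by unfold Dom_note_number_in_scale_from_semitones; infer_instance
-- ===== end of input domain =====

-- B replaces A's unbounded semitone-accumulating loop by a constant-time modular
-- lookup: the pitch class (floor-mod by an octave) is mapped to a degree through a
-- precomputed dict, and the octave contribution is added via floor division.

-- ===== PORT A =====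
def NOT_IN_SCALE : Int := -10000

def NOTE_JUMPS : List Int := [2, 2, 1, 2, 2, 2, 1]

-- NOTE_JUMPS[::-1]; slice? with step -1 is never none (none only for step 0)
def REV_NOTE_JUMPS : List Int := (PySem.List.slice? NOTE_JUMPS none none (-1)).getD []

-- one pass of the inner `for jump in …` loop: .inl r = early return, .inr = updated (i, count)
def pvPosRound (semis : Int) : List Int → Int × Int → Sum Int (Int × Int)
  | [], st => Sum.inr st
  | j :: rest, (i, count) =>
    let count := count + j
    if count = semis then Sum.inl (i + 1)
    else if count > semis then Sum.inl NOT_IN_SCALE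
    else pvPosRound semis rest (i + 1, count)

def pvNegRound (semis : Int) : List Int → Int × Int → Sum Int (Int × Int)
  | [], st => Sum.inr st
  | j :: rest, (i, count) =>
    let count := count - j
    if count = semis then Sum.inl (i - 1)
    else if count < semis then Sum.inl NOT_IN_SCALE
    else pvNegRound semis rest (i - 1, count)

-- the next four lemmas are needed by the ports' termination proofs (cited in decreasing_by)
lemma pvPosRound_inr_gen (semis : Int) (js : List Int) : ∀ (i count i' c' : Int),
    pvPosRound semis js (i, count) = Sum.inr (i', c') →
    i' = i + js.length ∧ c' = count + js.sum ∧ (js = [] ∨ c' < semis) := by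
  induction js with
  | nil =>
    intro i count i' c' h
    rw [pvPosRound] at h
    injection h with h
    injection h with h1 h2
    simp [h1, h2]
  | cons j rest ih =>
    intro i count i' c' h
    rw [pvPosRound] at h
    split_ifs at h with h1 h2
    obtain ⟨e1, e2, e3⟩ := ih _ _ _ _ h
    refine ⟨by simp [e1]; ring, by simp [e2]; ring, Or.inr ?_⟩
    rcases e3 with rfl | h3
    · simp at e2; omega
    · exact h3

lemma pvNegRound_inr_gen (semis : Int) (js : List Int) : ∀ (i count i' c' : Int),
    pvNegRound semis js (i, count) = Sum.inr (i', c') →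
    i' = i - js.length ∧ c' = count - js.sum ∧ (js = [] ∨ semis < c') := by
  induction js with
  | nil =>
    intro i count i' c' h
    rw [pvNegRound] at h
    injection h with h
    injection h with h1 h2
    simp [h1, h2]
  | cons j rest ih =>
    intro i count i' c' h
    rw [pvNegRound] at h
    split_ifs at h with h1 h2
    obtain ⟨e1, e2, e3⟩ := ih _ _ _ _ h
    refine ⟨by simp [e1]; ring, by simp [e2]; ring, Or.inr ?_⟩
    rcases e3 with rfl | h3
    · simp at e2; omega
    · exact h3

lemma pvPosRound_inr {semis i count i' c' : Int}
    (h : pvPosRound semis NOTE_JUMPS (i, count) = Sum.inr (i', c')) :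
    i' = i + 7 ∧ c' = count + 12 ∧ count + 12 < semis := by
  obtain ⟨e1, e2, e3⟩ := pvPosRound_inr_gen semis NOTE_JUMPS i count i' c' h
  rw [show (NOTE_JUMPS.length : Int) = 7 from by decide] at e1
  rw [show NOTE_JUMPS.sum = 12 from by decide] at e2
  rcases e3 with h3 | h3
  · exact absurd h3 (by decide)
  · omega

lemma pvNegRound_inr {semis i count i' c' : Int}
    (h : pvNegRound semis REV_NOTE_JUMPS (i, count) = Sum.inr (i', c')) :
    i' = i - 7 ∧ c' = count - 12 ∧ semis < count - 12 := by
  obtain ⟨e1, e2, e3⟩ := pvNegRound_inr_gen semis REV_NOTE_JUMPS i count i' c' h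
  rw [show (REV_NOTE_JUMPS.length : Int) = 7 from by decide] at e1
  rw [show REV_NOTE_JUMPS.sum = 12 from by decide] at e2
  rcases e3 with h3 | h3
  · exact absurd h3 (by decide)
  · omega

def pvPosWhile (semis i count : Int) : Int :=
  match h : pvPosRound semis NOTE_JUMPS (i, count) with
  | .inl r => r
  | .inr (i', c') => pvPosWhile semis i' c'
termination_by (semis - count).toNat
decreasing_by
  have := pvPosRound_inr h
  omega

def pvNegWhile (semis i count : Int) : Int :=
  match h : pvNegRound semis REV_NOTE_JUMPS (i, count) with
  | .inl r => r
  | .inr (i', c') => pvNegWhile semis i' c'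
termination_by (count - semis).toNat
decreasing_by
  have := pvNegRound_inr h
  omega

def note_number_in_scale_from_semitones (semis : Int) : Int :=
  if semis = 0 then 0
  else if semis ≥ 0 then pvPosWhile semis 0 0
  else pvNegWhile semis 0 0

-- ===== PORT B =====
def DEGREE_BY_PC : PySem.Dict Int Int :=
  PySem.Dict.ofList [(0, 0), (2, 1), (4, 2), (5, 3), (7, 4), (9, 5), (11, 6)]

def note_number_in_scale_from_semitones_alt (semis : Int) : Int :=
  match PySem.Dict.get? DEGREE_BY_PC (PySem.Int.mod semis 12) with
  | none => NOT_IN_SCALE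
  | some d => 7 * PySem.Int.floordiv semis 12 + d

-- ===== PRECONDITION & SPEC =====
def Spec_note_number_in_scale_from_semitones (semis : Int) (out : Int) : Prop := out = note_number_in_scale_from_semitones_alt semis
instance (semis : Int) (out : Int) : Decidable (Spec_note_number_in_scale_from_semitones semis out) := by unfold Spec_note_number_in_scale_from_semitones; infer_instance

-- ===== CLAIM (what is proved, stated in full; the proofs are below) =====
def Claim_equal_note_number_in_scale_from_semitones : Prop := ∀ (semis : Int), Dom_note_number_in_scale_from_semitones semis → Spec_note_number_in_scale_from_semitones semis (note_number_in_scale_from_semitones semis)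

-- ===== LEMMAS AND PROOFS =====

lemma pvRev_eq : REV_NOTE_JUMPS = [1, 2, 2, 2, 1, 2, 2] := by decide

-- B's closed form in plain Int arithmetic (Python's % and // at the positive divisor 12)
lemma pvAlt_eq (semis : Int) :
    note_number_in_scale_from_semitones_alt semis =
      (if semis % 12 = 0 then 7 * (semis / 12)
       else if semis % 12 = 2 then 7 * (semis / 12) + 1
       else if semis % 12 = 4 then 7 * (semis / 12) + 2
       else if semis % 12 = 5 then 7 * (semis / 12) + 3
       else if semis % 12 = 7 then 7 * (semis / 12) + 4
       else if semis % 12 = 9 then 7 * (semis / 12) + 5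
       else if semis % 12 = 11 then 7 * (semis / 12) + 6
       else -10000) := by
  have hm : PySem.Int.mod semis 12 = semis % 12 :=
    PySem.Int.mod_eq_emod_of_pos (by omega)
  have hd : PySem.Int.floordiv semis 12 = semis / 12 :=
    PySem.Int.floordiv_eq_ediv_of_pos (by omega)
  have h0 : 0 ≤ semis % 12 := Int.emod_nonneg _ (by omega)
  have h12 : semis % 12 < 12 := Int.emod_lt_of_pos _ (by omega)
  unfold note_number_in_scale_from_semitones_alt
  rw [hm, hd]
  interval_cases h : semis % 12 <;>
    simp [NOT_IN_SCALE,
      show PySem.Dict.get? DEGREE_BY_PC 0 = some 0 from by decide,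
      show PySem.Dict.get? DEGREE_BY_PC 1 = none from by decide,
      show PySem.Dict.get? DEGREE_BY_PC 2 = some 1 from by decide,
      show PySem.Dict.get? DEGREE_BY_PC 3 = none from by decide,
      show PySem.Dict.get? DEGREE_BY_PC 4 = some 2 from by decide,
      show PySem.Dict.get? DEGREE_BY_PC 5 = some 3 from by decide,
      show PySem.Dict.get? DEGREE_BY_PC 6 = none from by decide,
      show PySem.Dict.get? DEGREE_BY_PC 7 = some 4 from by decide,
      show PySem.Dict.get? DEGREE_BY_PC 8 = none from by decide,
      show PySem.Dict.get? DEGREE_BY_PC 9 = some 5 from by decide,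
      show PySem.Dict.get? DEGREE_BY_PC 10 = none from by decide,
      show PySem.Dict.get? DEGREE_BY_PC 11 = some 6 from by decide]

set_option maxHeartbeats 1600000 in
lemma pvPosWhile_eq : ∀ (n : Nat) (semis m : Int), (semis - 12 * m).toNat ≤ n → 12 * m < semis →
    pvPosWhile semis (7 * m) (12 * m) = note_number_in_scale_from_semitones_alt semis := by
  intro n
  induction n with
  | zero => intro semis m hn hlt; omega
  | succ n ih =>
    intro semis m hn hlt
    rw [pvPosWhile]
    split
    · next r heq =>
      rw [show NOTE_JUMPS = [2, 2, 1, 2, 2, 2, 1] from rfl] at heq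
      rw [pvPosRound] at heq
      split_ifs at heq with hA0 hB0
      · injection heq with e
        subst e
        rw [pvAlt_eq]
        split_ifs <;> omega
      · injection heq with e
        subst e
        rw [pvAlt_eq]
        simp only [NOT_IN_SCALE]
        split_ifs <;> omega
      ·
        rw [pvPosRound] at heq
        split_ifs at heq with hA1 hB1
        · injection heq with e
          subst e
          rw [pvAlt_eq]
          split_ifs <;> omega
        · injection heq with e
          subst e
          rw [pvAlt_eq]
          simp only [NOT_IN_SCALE]
          split_ifs <;> omega
        ·
          rw [pvPosRound] at heq
          split_ifs at heq with hA2 hB2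
          · injection heq with e
            subst e
            rw [pvAlt_eq]
            split_ifs <;> omega
          · injection heq with e
            subst e
            rw [pvAlt_eq]
            simp only [NOT_IN_SCALE]
            split_ifs <;> omega
          ·
            rw [pvPosRound] at heq
            split_ifs at heq with hA3 hB3
            · injection heq with e
              subst e
              rw [pvAlt_eq]
              split_ifs <;> omega
            · injection heq with e
              subst e
              rw [pvAlt_eq]
              simp only [NOT_IN_SCALE]
              split_ifs <;> omega
            ·
              rw [pvPosRound] at heq
              split_ifs at heq with hA4 hB4
              · injection heq with e
                subst e
                rw [pvAlt_eq]
                split_ifs <;> omega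
              · injection heq with e
                subst e
                rw [pvAlt_eq]
                simp only [NOT_IN_SCALE]
                split_ifs <;> omega
              ·
                rw [pvPosRound] at heq
                split_ifs at heq with hA5 hB5
                · injection heq with e
                  subst e
                  rw [pvAlt_eq]
                  split_ifs <;> omega
                · injection heq with e
                  subst e
                  rw [pvAlt_eq]
                  simp only [NOT_IN_SCALE]
                  split_ifs <;> omega
                ·
                  rw [pvPosRound] at heq
                  split_ifs at heq with hA6 hB6
                  · injection heq with e
                    subst e
                    rw [pvAlt_eq]
                    split_ifs <;> omega
                  · injection heq with e
                    subst e
                    rw [pvAlt_eq]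
                    simp only [NOT_IN_SCALE]
                    split_ifs <;> omega
                  ·
                    rw [pvPosRound] at heq
                    simp at heq
    · next i' c' heq =>
      obtain ⟨hi, hc, hlt'⟩ := pvPosRound_inr heq
      have e1 : i' = 7 * (m + 1) := by omega
      have e2 : c' = 12 * (m + 1) := by omega
      rw [e1, e2]
      exact ih semis (m + 1) (by omega) (by omega)

set_option maxHeartbeats 1600000 in
lemma pvNegWhile_eq : ∀ (n : Nat) (semis m : Int), (-(12 * m) - semis).toNat ≤ n → semis < -(12 * m) →
    pvNegWhile semis (-(7 * m)) (-(12 * m)) = note_number_in_scale_from_semitones_alt semis := by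
  intro n
  induction n with
  | zero => intro semis m hn hlt; omega
  | succ n ih =>
    intro semis m hn hlt
    rw [pvNegWhile]
    split
    · next r heq =>
      rw [pvRev_eq] at heq
      rw [pvNegRound] at heq
      split_ifs at heq with hA0 hB0
      · injection heq with e
        subst e
        rw [pvAlt_eq]
        split_ifs <;> omega
      · injection heq with e
        subst e
        rw [pvAlt_eq]
        simp only [NOT_IN_SCALE]
        split_ifs <;> omega
      ·
        rw [pvNegRound] at heq
        split_ifs at heq with hA1 hB1
        · injection heq with e
          subst e
          rw [pvAlt_eq]
          split_ifs <;> omega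
        · injection heq with e
          subst e
          rw [pvAlt_eq]
          simp only [NOT_IN_SCALE]
          split_ifs <;> omega
        ·
          rw [pvNegRound] at heq
          split_ifs at heq with hA2 hB2
          · injection heq with e
            subst e
            rw [pvAlt_eq]
            split_ifs <;> omega
          · injection heq with e
            subst e
            rw [pvAlt_eq]
            simp only [NOT_IN_SCALE]
            split_ifs <;> omega
          ·
            rw [pvNegRound] at heq
            split_ifs at heq with hA3 hB3
            · injection heq with e
              subst e
              rw [pvAlt_eq]
              split_ifs <;> omega
            · injection heq with e
              subst e
              rw [pvAlt_eq]
              simp only [NOT_IN_SCALE]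
              split_ifs <;> omega
            ·
              rw [pvNegRound] at heq
              split_ifs at heq with hA4 hB4
              · injection heq with e
                subst e
                rw [pvAlt_eq]
                split_ifs <;> omega
              · injection heq with e
                subst e
                rw [pvAlt_eq]
                simp only [NOT_IN_SCALE]
                split_ifs <;> omega
              ·
                rw [pvNegRound] at heq
                split_ifs at heq with hA5 hB5
                · injection heq with e
                  subst e
                  rw [pvAlt_eq]
                  split_ifs <;> omega
                · injection heq with e
                  subst e
                  rw [pvAlt_eq]
                  simp only [NOT_IN_SCALE]
                  split_ifs <;> omega
                ·
                  rw [pvNegRound] at heq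
                  split_ifs at heq with hA6 hB6
                  · injection heq with e
                    subst e
                    rw [pvAlt_eq]
                    split_ifs <;> omega
                  · injection heq with e
                    subst e
                    rw [pvAlt_eq]
                    simp only [NOT_IN_SCALE]
                    split_ifs <;> omega
                  ·
                    rw [pvNegRound] at heq
                    simp at heq
    · next i' c' heq =>
      obtain ⟨hi, hc, hlt'⟩ := pvNegRound_inr heq
      have e1 : i' = -(7 * (m + 1)) := by omega
      have e2 : c' = -(12 * (m + 1)) := by omega
      rw [e1, e2]
      exact ih semis (m + 1) (by omega) (by omega)

-- ===== VERDICT (by name: the statement is the Claim_ definition above) =====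
theorem note_number_in_scale_from_semitones_spec : Claim_equal_note_number_in_scale_from_semitones := by
  intro semis _
  unfold Spec_note_number_in_scale_from_semitones note_number_in_scale_from_semitones
  by_cases h0 : semis = 0
  · subst h0; decide
  · by_cases hp : semis ≥ 0
    · simp only [h0, hp, if_false, if_true]
      have := pvPosWhile_eq semis.toNat semis 0 (by omega) (by omega)
      simpa using this
    · simp only [h0, hp, if_false]
      have := pvNegWhile_eq (-semis).toNat semis 0 (by omega) (by omega)
      simpa using this
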